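-- pv_equiv track=rewrite | github.com/flashinfer-ai/flashinfer | tests/moe/test_cute_dsl_fused_moe.py | _worst_case_actual_tile_count
-- ===== SOURCE A (Python) =====
-- def _worst_case_actual_tile_count(
--     num_tokens: int, top_k: int, num_local_experts: int, tile_size: int
-- ) -> int:
--     """Construct the worst-case routing distribution (one expert
--     receives ``E - L + 1`` tokens, the others each receive 1 token)
--     and compute the actual ``sum_e ceil(K_e / tile_size)``. This is
--     the value the moe_sort kernel writes to ``num_non_exiting_tiles``
--     in the worst case."""
--     num_expanded_tokens = num_tokens * top_k
--     L = num_local_experts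
--     T = tile_size
--     if num_expanded_tokens <= L:
--         return num_expanded_tokens
--     per_expert = [1] * (L - 1) + [num_expanded_tokens - (L - 1)]
--     assert sum(per_expert) == num_expanded_tokens
--     return sum((k + T - 1) // T for k in per_expert)
-- ===== SOURCE B (Python) =====
-- def _worst_case_actual_tile_count(
--     num_tokens: int, top_k: int, num_local_experts: int, tile_size: int
-- ) -> int:
--     # Closed form without any ceiling trick: each of the L-1 singleton
--     # experts takes one tile, and the heavy expert with h = n-L+1 tokens
--     # takes ceil(h/T) = (h-1)//T + 1 tiles (exact for every T != 0, since
--     # (h+T-1)//T = (h-1)//T + 1).  Total = (L-1) + (n-L)//T + 1 = L + (n-L)//T.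
--     n = num_tokens * top_k
--     overflow = n - num_local_experts
--     if overflow <= 0:
--         return n
--     return num_local_experts + overflow // tile_size
-- ===== Notes on version B (the rewrite author's own statement) =====
-- stated objective: faster
-- what changed: B replaces A's length-L list of per-expert token counts and its summed ceiling divisions (k+T-1)//T with a single floor division: answer = L + (n-L)//T when n > L, using (h+T-1)//T = (h-1)//T + 1.
import Mathlib
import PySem

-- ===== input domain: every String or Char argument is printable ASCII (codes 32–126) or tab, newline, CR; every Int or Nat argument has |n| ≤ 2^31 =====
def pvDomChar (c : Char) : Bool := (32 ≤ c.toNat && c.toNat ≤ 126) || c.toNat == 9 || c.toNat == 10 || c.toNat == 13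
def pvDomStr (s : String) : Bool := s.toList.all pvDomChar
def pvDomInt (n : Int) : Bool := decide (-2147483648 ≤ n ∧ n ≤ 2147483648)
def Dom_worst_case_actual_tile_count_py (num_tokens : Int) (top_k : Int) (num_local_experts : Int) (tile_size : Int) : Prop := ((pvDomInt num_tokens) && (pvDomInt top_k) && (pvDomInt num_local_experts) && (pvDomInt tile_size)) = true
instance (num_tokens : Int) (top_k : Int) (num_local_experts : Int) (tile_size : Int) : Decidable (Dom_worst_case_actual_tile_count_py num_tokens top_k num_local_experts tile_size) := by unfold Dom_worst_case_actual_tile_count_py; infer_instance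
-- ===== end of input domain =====

-- B replaces A's per-expert list and its summed ceiling divisions by a single floor division L + (n-L)//T (simpler).

-- ===== PORT A =====
def worst_case_actual_tile_count_py (num_tokens : Int) (top_k : Int) (num_local_experts : Int) (tile_size : Int) : Int :=
  let num_expanded_tokens := num_tokens * top_k
  let L := num_local_experts
  let T := tile_size
  if num_expanded_tokens <= L then num_expanded_tokens
  else
    -- per_expert = [1] * (L - 1) + [num_expanded_tokens - (L - 1)]  (negative repeat count gives [])
    let per_expert : List Int := List.replicate (L - 1).toNat 1 ++ [num_expanded_tokens - (L - 1)]
    -- (the Python assert holds on Pre_; where it would fail, Pre_ excludes the input)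
    -- sum((k + T - 1) // T for k in per_expert)
    per_expert.foldl (fun acc k => acc + PySem.Int.floordiv (k + T - 1) T) 0

-- ===== PORT B =====
def worst_case_actual_tile_count_py_alt (num_tokens : Int) (top_k : Int) (num_local_experts : Int) (tile_size : Int) : Int :=
  let n := num_tokens * top_k
  let overflow := n - num_local_experts
  if overflow ≤ 0 then n
  else num_local_experts + PySem.Int.floordiv overflow tile_size

-- ===== PRECONDITION & SPEC =====
-- Pre_ excludes exactly the inputs where A raises: when num_tokens*top_k > num_local_experts,
-- A raises AssertionError if num_local_experts < 1, and ZeroDivisionError if tile_size = 0.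
def Pre_worst_case_actual_tile_count_py (num_tokens : Int) (top_k : Int) (num_local_experts : Int) (tile_size : Int) : Prop :=
  num_tokens * top_k ≤ num_local_experts ∨ (1 ≤ num_local_experts ∧ tile_size ≠ 0)
instance (num_tokens : Int) (top_k : Int) (num_local_experts : Int) (tile_size : Int) : Decidable (Pre_worst_case_actual_tile_count_py num_tokens top_k num_local_experts tile_size) := by unfold Pre_worst_case_actual_tile_count_py; infer_instance

def pvWitness_worst_case_actual_tile_count_py : Int × Int × Int × Int := (4, 2, 3, 2)

def Spec_worst_case_actual_tile_count_py (num_tokens : Int) (top_k : Int) (num_local_experts : Int) (tile_size : Int) (out : Int) : Prop := out = worst_case_actual_tile_count_py_alt num_tokens top_k num_local_experts tile_size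
instance (num_tokens : Int) (top_k : Int) (num_local_experts : Int) (tile_size : Int) (out : Int) : Decidable (Spec_worst_case_actual_tile_count_py num_tokens top_k num_local_experts tile_size out) := by unfold Spec_worst_case_actual_tile_count_py; infer_instance

-- ===== CLAIM =====
def Claim_equal_worst_case_actual_tile_count_py : Prop := ∀ (num_tokens : Int) (top_k : Int) (num_local_experts : Int) (tile_size : Int), Dom_worst_case_actual_tile_count_py num_tokens top_k num_local_experts tile_size → Pre_worst_case_actual_tile_count_py num_tokens top_k num_local_experts tile_size → Spec_worst_case_actual_tile_count_py num_tokens top_k num_local_experts tile_size (worst_case_actual_tile_count_py num_tokens top_k num_local_experts tile_size)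

-- ===== LEMMAS AND PROOFS =====

-- Each singleton expert contributes one tile: T // T = 1 for T ≠ 0.
lemma floordiv_self_of_ne_zero (T : Int) (h : T ≠ 0) : PySem.Int.floordiv T T = 1 := by
  rcases lt_or_gt_of_ne h with hneg | hpos
  · have hfm := PySem.Int.floordiv_mul_add_mod T T
    have hb := PySem.Int.mod_neg_bounds T hneg
    nlinarith [hb.1, hb.2]
  · rw [PySem.Int.floordiv_eq_ediv_of_pos hpos]
    exact Int.ediv_self (by omega)

-- Adding the divisor to the dividend increments the floor quotient (any T ≠ 0).
lemma floordiv_add_divisor (a T : Int) (h : T ≠ 0) :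
    PySem.Int.floordiv (a + T) T = PySem.Int.floordiv a T + 1 := by
  have h1 := PySem.Int.floordiv_mul_add_mod (a + T) T
  have h2 := PySem.Int.floordiv_mul_add_mod a T
  rcases lt_or_gt_of_ne h with hneg | hpos
  · have b1 := PySem.Int.mod_neg_bounds (a + T) hneg
    have b2 := PySem.Int.mod_neg_bounds a hneg
    nlinarith [b1.1, b1.2, b2.1, b2.2]
  · nlinarith [PySem.Int.mod_nonneg (a + T) hpos, PySem.Int.mod_lt (a + T) hpos,
      PySem.Int.mod_nonneg a hpos, PySem.Int.mod_lt a hpos]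

-- Folding a constant contribution over `replicate m 1` adds m copies of f 1.
lemma foldl_replicate_const (m : Nat) (f : Int → Int) (acc : Int) :
    (List.replicate m (1 : Int)).foldl (fun a k => a + f k) acc = acc + m * f 1 := by
  induction m generalizing acc with
  | zero => simp
  | succ m ih => simp [List.replicate_succ, List.foldl_cons, ih]; ring

-- ===== VERDICT =====
theorem worst_case_actual_tile_count_py_spec : Claim_equal_worst_case_actual_tile_count_py := by
  intro nt tk L T _ hpre
  unfold Spec_worst_case_actual_tile_count_py worst_case_actual_tile_count_py worst_case_actual_tile_count_py_alt
  simp only []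
  by_cases hle : nt * tk ≤ L
  · have hov : nt * tk - L ≤ 0 := by omega
    simp [hle, hov]
  · have hov : ¬ (nt * tk - L ≤ 0) := by omega
    simp only [if_neg hle, if_neg hov]
    rcases hpre with h | ⟨hL, hT⟩
    · exact absurd h hle
    · rw [List.foldl_append, foldl_replicate_const]
      have h1 : (1 : Int) + T - 1 = T := by ring
      rw [List.foldl_cons, List.foldl_nil, h1, floordiv_self_of_ne_zero T hT]
      have harg : nt * tk - (L - 1) + T - 1 = (nt * tk - L) + T := by ring
      rw [harg, floordiv_add_divisor _ _ hT]
      have hcast : ((L - 1).toNat : Int) = L - 1 := Int.toNat_of_nonneg (by omega)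
      rw [hcast]
      ring
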